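-- pv_equiv track=rewrite | github.com/michikazuokai/build_slide | texread.py | find_end_to_next_start_ranges
-- ===== SOURCE A (Python) =====
-- def find_end_to_next_start_ranges(lines):
--     end_indices = []
--     start_indices = []
--
--     for i, line in enumerate(lines):
--         line = line.strip()
--         if line.startswith(r"\begin{frame}"):
--             start_indices.append(i)
--         elif line.startswith(r"\end{frame}"):
--             end_indices.append(i)
--
--     pairs = [(0, start_indices[0])]
--     start_pos = 0
--     for end in end_indices:
--         # 次の開始行を探す（終了行より大きい最小の開始行）
--         while start_pos < len(start_indices) and start_indices[start_pos] <= end: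
--             start_pos += 1
--         if start_pos < len(start_indices):
--             pairs.append((end, start_indices[start_pos]))
--         else:
--             # 次の開始行がなければペアは作らない（またはNoneを入れるなど）
--             pairs.append((end, None))
--             break
--     return pairs
-- ===== SOURCE B (Python) =====
-- def _bisect_right(a, x):
--     lo, hi = 0, len(a)
--     while lo < hi:
--         mid = (lo + hi) // 2
--         if a[mid] <= x:
--             lo = mid + 1
--         else:
--             hi = mid
--     return lo
--
--
-- def find_end_to_next_start_ranges(lines):
--     stripped = [line.strip() for line in lines]
--     start_indices = [i for i, t in enumerate(stripped) if t.startswith("\\begin{frame}")]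
--     end_indices = [i for i, t in enumerate(stripped) if t.startswith("\\end{frame}")]
--     if not start_indices:
--         return []
--     pairs = [(0, start_indices[0])]
--     for end in end_indices:
--         j = _bisect_right(start_indices, end)
--         if j < len(start_indices):
--             pairs.append((end, start_indices[j]))
--         else:
--             pairs.append((end, None))
--             break
--     return pairs
-- ===== Notes on version B (the rewrite author's own statement) =====
-- stated objective: alternative
-- what changed: The fold-with-elif classification scan is replaced by two list comprehensions over the stripped lines, and the stateful two-pointer pairing loop is replaced by an independent hand-written bisect_right binary search per end index.
import Mathlib
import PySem

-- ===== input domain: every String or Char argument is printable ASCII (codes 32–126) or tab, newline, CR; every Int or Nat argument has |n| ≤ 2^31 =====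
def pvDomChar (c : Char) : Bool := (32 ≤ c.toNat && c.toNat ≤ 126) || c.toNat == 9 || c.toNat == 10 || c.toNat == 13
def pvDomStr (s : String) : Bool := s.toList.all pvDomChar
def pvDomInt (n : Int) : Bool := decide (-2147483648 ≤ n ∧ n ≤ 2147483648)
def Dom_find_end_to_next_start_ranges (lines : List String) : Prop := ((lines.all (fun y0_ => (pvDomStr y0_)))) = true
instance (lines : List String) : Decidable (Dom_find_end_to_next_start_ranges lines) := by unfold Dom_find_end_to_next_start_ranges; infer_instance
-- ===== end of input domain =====

-- B replaces A's fold-with-elif classification by two comprehensions and A's stateful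
-- two-pointer pairing loop by a per-end hand-written binary search (alternative decomposition).

-- ===== PORT A =====
-- the classification loop: state = (end_indices, start_indices), appended in order
def pvScanA (lines : List String) : List Int × List Int :=
  (PySem.List.enumerate lines 0).foldl
    (fun (st : List Int × List Int) p =>
      let line := PySem.Str.strip p.2
      if PySem.Str.startswith line "\\begin{frame}" then (st.1, st.2 ++ [p.1])
      else if PySem.Str.startswith line "\\end{frame}" then (st.1 ++ [p.1], st.2)
      else st)
    ([], [])

-- the inner `while start_pos < len(start_indices) and start_indices[start_pos] <= end`
def pvAdvance (starts : List Int) (e : Int) (pos : Nat) : Nat :=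
  if _h : pos < starts.length ∧ starts.getD pos 0 ≤ e then pvAdvance starts e (pos + 1) else pos
termination_by starts.length - pos
decreasing_by omega

-- the `for end in end_indices` loop carrying start_pos (break ends the loop)
def pvPairLoopA (starts : List Int) : List Int → Nat → List (Int × Option Int)
  | [], _ => []
  | e :: rest, pos =>
    let pos' := pvAdvance starts e pos
    if pos' < starts.length then (e, some (starts.getD pos' 0)) :: pvPairLoopA starts rest pos'
    else [(e, none)]

def find_end_to_next_start_ranges (lines : List String) : List (Int × Option Int) :=
  let scan := pvScanA lines
  -- start_indices[0] raises IndexError when there is no start line; Pre_ excludes that (getD is a total surrogate)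
  (0, some (scan.2.getD 0 0)) :: pvPairLoopA scan.2 scan.1 0

-- ===== PORT B =====
-- hand-written _bisect_right from Source B, step for step (mid = (lo + hi) // 2 inlined)
def pvBisectGo (a : List Int) (x : Int) (lo hi : Nat) : Nat :=
  if _h : lo < hi then
    if a.getD ((lo + hi) / 2) 0 ≤ x then pvBisectGo a x ((lo + hi) / 2 + 1) hi
    else pvBisectGo a x lo ((lo + hi) / 2)
  else lo
termination_by hi - lo
decreasing_by all_goals omega

def pvBisectRight (a : List Int) (x : Int) : Nat := pvBisectGo a x 0 a.length

def pvPairLoopB (starts : List Int) : List Int → List (Int × Option Int)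
  | [] => []
  | e :: rest =>
    let j := pvBisectRight starts e
    if j < starts.length then (e, some (starts.getD j 0)) :: pvPairLoopB starts rest
    else [(e, none)]

def find_end_to_next_start_ranges_alt (lines : List String) : List (Int × Option Int) :=
  let stripped := lines.map PySem.Str.strip
  let start_indices := (PySem.List.enumerate stripped 0).filterMap
    (fun p => if PySem.Str.startswith p.2 "\\begin{frame}" then some p.1 else none)
  let end_indices := (PySem.List.enumerate stripped 0).filterMap
    (fun p => if PySem.Str.startswith p.2 "\\end{frame}" then some p.1 else none)
  match start_indices with
  | [] => []
  | s0 :: _ => (0, some s0) :: pvPairLoopB start_indices end_indices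

-- ===== PRECONDITION & SPEC =====
-- Pre_ excludes exactly the inputs with no stripped line starting with "\begin{frame}",
-- on which A raises IndexError at start_indices[0].
def Pre_find_end_to_next_start_ranges (lines : List String) : Prop :=
  (lines.any (fun l => PySem.Str.startswith (PySem.Str.strip l) "\\begin{frame}")) = true
instance (lines : List String) : Decidable (Pre_find_end_to_next_start_ranges lines) := by
  unfold Pre_find_end_to_next_start_ranges; infer_instance
def pvWitness_find_end_to_next_start_ranges : List String :=
  ["\\begin{frame}", "x", "\\end{frame}"]

def Spec_find_end_to_next_start_ranges (lines : List String) (out : List (Int × Option Int)) : Prop :=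
  out = find_end_to_next_start_ranges_alt lines
instance (lines : List String) (out : List (Int × Option Int)) :
    Decidable (Spec_find_end_to_next_start_ranges lines out) := by
  unfold Spec_find_end_to_next_start_ranges; infer_instance

-- ===== CLAIM (what is proved, stated in full; the proofs are below) =====
def Claim_equal_find_end_to_next_start_ranges : Prop := ∀ (lines : List String), Dom_find_end_to_next_start_ranges lines → Pre_find_end_to_next_start_ranges lines → Spec_find_end_to_next_start_ranges lines (find_end_to_next_start_ranges lines)
-- ===== LEMMAS AND PROOFS =====

-- a stripped line cannot start with both markers
theorem pv_not_both (s : String) (h : PySem.Str.startswith s "\\begin{frame}" = true) :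
    PySem.Str.startswith s "\\end{frame}" = false := by
  by_contra hc
  rw [Bool.not_eq_false] at hc
  rw [PySem.Str.startswith_eq, PySem.Chars.startswith_iff] at h hc
  rcases List.prefix_or_prefix_of_prefix h hc with h' | h' <;> revert h' <;> decide

-- length of the ≤-x prefix of a list (the value both the while loop and bisect_right compute)
def pvTw : List Int → Int → Nat
  | [], _ => 0
  | a :: r, x => if a ≤ x then pvTw r x + 1 else 0

theorem pvTw_le (a : List Int) (x : Int) : pvTw a x ≤ a.length := by
  induction a with
  | nil => simp [pvTw]
  | cons h t ih => simp only [pvTw, List.length_cons]; split <;> omega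

theorem pvTw_getD_lt (a : List Int) (x : Int) (i : Nat) (hi : i < pvTw a x) :
    a.getD i 0 ≤ x := by
  induction a generalizing i with
  | nil => simp [pvTw] at hi
  | cons h t ih =>
    simp only [pvTw] at hi
    split at hi
    · cases i with
      | zero => simpa
      | succ j => simpa using ih j (by omega)
    · omega

theorem pvTw_getD_self (a : List Int) (x : Int) (h : pvTw a x < a.length) :
    x < a.getD (pvTw a x) 0 := by
  induction a with
  | nil => simp at h
  | cons hd t ih =>
    by_cases hh : hd ≤ x
    · simp only [pvTw, if_pos hh, List.length_cons] at h ⊢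
      rw [List.getD_cons_succ]
      exact ih (by omega)
    · simp only [pvTw, if_neg hh, List.getD_cons_zero]
      omega

theorem pvTw_mono (a : List Int) (x y : Int) (hxy : x ≤ y) : pvTw a x ≤ pvTw a y := by
  induction a with
  | nil => simp [pvTw]
  | cons h t ih =>
    simp only [pvTw]
    split
    · rw [if_pos (by omega)]; omega
    · omega

theorem pvTw_ge_of_sorted (a : List Int) (x : Int) (ha : a.Pairwise (· ≤ ·)) (i : Nat)
    (hi : i < a.length) (hle : a.getD i 0 ≤ x) : i < pvTw a x := by
  induction a generalizing i with
  | nil => simp at hi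
  | cons h t ih =>
    rcases List.pairwise_cons.mp ha with ⟨hh, ht⟩
    cases i with
    | zero =>
      simp only [List.getD_cons_zero] at hle
      simp [pvTw, hle]
    | succ j =>
      have hjl : j < t.length := by simpa using hi
      rw [List.getD_cons_succ, List.getD_eq_getElem t 0 hjl] at hle
      have hj : j < pvTw t x := ih ht j hjl (by rw [List.getD_eq_getElem t 0 hjl]; exact hle)
      have hhx : h ≤ x := le_trans (hh _ (List.getElem_mem hjl)) hle
      simp only [pvTw, if_pos hhx]; omega

theorem pvAdvance_eq (starts : List Int) (e : Int) (pos : Nat)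
    (hpos : pos ≤ pvTw starts e) : pvAdvance starts e pos = pvTw starts e := by
  fun_induction pvAdvance starts e pos with
  | case1 pos h ih =>
    apply ih
    rcases Nat.lt_or_ge pos (pvTw starts e) with h1 | h1
    · omega
    · have hE : pos = pvTw starts e := by omega
      rcases h with ⟨hl, hle⟩
      rw [hE] at hle hl
      exact absurd hle (not_le.mpr (pvTw_getD_self starts e hl))
  | case2 pos h =>
    rcases Nat.lt_or_ge pos (pvTw starts e) with h1 | h1
    · exact absurd ⟨by have := pvTw_le starts e; omega, pvTw_getD_lt starts e pos h1⟩ h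
    · omega

theorem pvBisectGo_eq (a : List Int) (x : Int) (ha : a.Pairwise (· ≤ ·)) (lo hi : Nat)
    (h1 : lo ≤ pvTw a x) (h2 : pvTw a x ≤ hi) (h3 : hi ≤ a.length) :
    pvBisectGo a x lo hi = pvTw a x := by
  fun_induction pvBisectGo a x lo hi with
  | case1 lo hi hlt hle ih =>
    exact ih (pvTw_ge_of_sorted a x ha _ (by omega) hle) h2 h3
  | case2 lo hi hlt hgt ih =>
    refine ih h1 ?_ (by omega)
    by_contra hc
    exact hgt (pvTw_getD_lt a x _ (by omega))
  | case3 lo hi hge => omega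

theorem pvPairLoop_eq (starts : List Int) (hs : starts.Pairwise (· ≤ ·)) (ends : List Int)
    (he : ends.Pairwise (· ≤ ·)) (pos : Nat) (hpos : ∀ e ∈ ends, pos ≤ pvTw starts e) :
    pvPairLoopA starts ends pos = pvPairLoopB starts ends := by
  induction ends generalizing pos with
  | nil => rfl
  | cons e rest ih =>
    rcases List.pairwise_cons.mp he with ⟨hee, her⟩
    have hadv : pvAdvance starts e pos = pvTw starts e :=
      pvAdvance_eq starts e pos (hpos e (by simp))
    have hbis : pvBisectRight starts e = pvTw starts e :=
      pvBisectGo_eq starts e hs 0 starts.length (Nat.zero_le _) (pvTw_le _ _) le_rfl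
    simp only [pvPairLoopA, pvPairLoopB, hadv, hbis]
    by_cases hlt : pvTw starts e < starts.length
    · simp only [if_pos hlt, List.cons.injEq, true_and]
      exact ih her _ (fun e' h' => pvTw_mono starts e e' (hee e' h'))
    · simp [hlt]

-- the classification fold written as two filterMaps (elif removed via pv_not_both)
theorem pvScan_spec (l : List (Int × String)) (acc : List Int × List Int) :
    l.foldl
      (fun (st : List Int × List Int) p =>
        let line := PySem.Str.strip p.2
        if PySem.Str.startswith line "\\begin{frame}" then (st.1, st.2 ++ [p.1])
        else if PySem.Str.startswith line "\\end{frame}" then (st.1 ++ [p.1], st.2)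
        else st)
      acc =
    (acc.1 ++ l.filterMap (fun p => if PySem.Str.startswith (PySem.Str.strip p.2) "\\end{frame}" then some p.1 else none),
     acc.2 ++ l.filterMap (fun p => if PySem.Str.startswith (PySem.Str.strip p.2) "\\begin{frame}" then some p.1 else none)) := by
  induction l generalizing acc with
  | nil => simp
  | cons p rest ih =>
    simp only [List.foldl_cons, List.filterMap_cons]
    rw [ih]
    by_cases hb : PySem.Str.startswith (PySem.Str.strip p.2) "\\begin{frame}" = true
    · have hnb := pv_not_both _ hb
      simp only [hb, hnb, reduceIte, Bool.false_eq_true, Prod.mk.injEq]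
      simp [List.append_assoc]
    · rw [Bool.not_eq_true] at hb
      by_cases hee : PySem.Str.startswith (PySem.Str.strip p.2) "\\end{frame}" = true
      · simp only [hb, hee, reduceIte, Bool.false_eq_true, Prod.mk.injEq]
        simp [List.append_assoc]
      · rw [Bool.not_eq_true] at hee
        simp only [hb, hee, reduceIte, Bool.false_eq_true]

theorem pv_enumerate_map (f : String → String) (xs : List String) (s : Int) :
    PySem.List.enumerate (xs.map f) s = (PySem.List.enumerate xs s).map (fun p => (p.1, f p.2)) := by
  induction xs generalizing s with
  | nil => simp [PySem.List.enumerate_nil]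
  | cons h t ih => simp [PySem.List.enumerate_cons, ih]

-- both index lists are weakly sorted (indices from enumerate are strictly increasing)
theorem pv_sorted_sel (xs : List (Int × String)) (hxs : xs.Pairwise (fun p q => p.1 < q.1))
    (sel : (Int × String) → Option Int) (hsel : ∀ p i, sel p = some i → i = p.1) :
    (xs.filterMap sel).Pairwise (· ≤ ·) := by
  rw [List.pairwise_filterMap]
  refine hxs.imp ?_
  intro p q hpq i hi j hj
  rw [hsel p i hi, hsel q j hj]
  omega

-- ===== VERDICT (by name: the statement is the Claim_ definition above) =====
set_option maxHeartbeats 2000000 in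
theorem find_end_to_next_start_ranges_spec : Claim_equal_find_end_to_next_start_ranges := by
  intro lines _ hpre
  unfold Spec_find_end_to_next_start_ranges
  unfold find_end_to_next_start_ranges find_end_to_next_start_ranges_alt
  simp only [pvScanA, pvScan_spec, pv_enumerate_map, List.filterMap_map, Function.comp_def,
    List.nil_append]
  set S := (PySem.List.enumerate lines 0).filterMap
      (fun p => if PySem.Str.startswith (PySem.Str.strip p.2) "\\begin{frame}" then some p.1 else none) with hS
  set E := (PySem.List.enumerate lines 0).filterMap
      (fun p => if PySem.Str.startswith (PySem.Str.strip p.2) "\\end{frame}" then some p.1 else none) with hE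
  have hsortS : S.Pairwise (· ≤ ·) := by
    rw [hS]
    exact pv_sorted_sel _ (PySem.List.pairwise_lt_enumerate lines 0) _
      (fun p i hi => by dsimp at hi; split at hi <;> simp_all)
  have hsortE : E.Pairwise (· ≤ ·) := by
    rw [hE]
    exact pv_sorted_sel _ (PySem.List.pairwise_lt_enumerate lines 0) _
      (fun p i hi => by dsimp at hi; split at hi <;> simp_all)
  have hSne : S ≠ [] := by
    rw [hS]
    unfold Pre_find_end_to_next_start_ranges at hpre
    rw [List.any_eq_true] at hpre
    obtain ⟨l, hl, hcond⟩ := hpre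
    obtain ⟨k, hk, hkl⟩ := List.mem_iff_getElem.mp hl
    intro hnil
    have hen : (0 + (k : Int), lines[k]) ∈ PySem.List.enumerate lines 0 :=
      (PySem.List.mem_enumerate_iff _ _ _).mpr ⟨k, hk, rfl⟩
    rw [List.filterMap_eq_nil_iff] at hnil
    have h2 := hnil _ hen
    simp only [hkl, hcond, reduceIte] at h2
    exact Option.some_ne_none _ h2
  obtain ⟨s0, tl, hST⟩ := List.exists_cons_of_ne_nil hSne
  rw [hST] at hsortS ⊢
  simp only [List.getD_cons_zero]
  rw [pvPairLoop_eq _ hsortS _ hsortE 0 (fun _ _ => Nat.zero_le _)]
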